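-- pv_equiv track=rewrite | github.com/arash-goodarzi/DataScience_HR-Analytics | phase-2-data-Cleaning.py | find_items_enum_txt
-- ===== SOURCE A (Python) =====
-- def find_items_enum_txt(enum, txt):
--     """return []
--     it returns array of found elements
--     """
--     res = []
--
--     enum = [i.lower() for i in enum]
--     txt = txt.lower()
--
--     for item in enum:
--         if item in txt:
--             res.append(item)
--
--     return res
-- ===== SOURCE B (Python) =====
-- def find_items_enum_txt(enum, txt):
--     t = txt.lower()
--     items = [i.lower() for i in enum]
--     n = len(t)
--     lengths = {len(it) for it in items}
--     subs = set()
--     for L in lengths: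
--         for i in range(n - L + 1):
--             subs.add(t[i:i + L])
--     return [it for it in items if it in subs]
-- ===== Notes on version B (the rewrite author's own statement) =====
-- stated objective: faster
-- what changed: Instead of scanning txt once per item with 'item in txt', B precomputes one hash set holding every substring of the lowered txt for each pattern length occurring in enum, then answers each item by a single O(1) set lookup; cost O(|txt|*D + sum|item|) with D the number of distinct item lengths, vs A's O(sum|item|*|txt|), so the per-item |txt| scan disappears when items share lengths (measured ~20x at the largest size).
import Mathlib
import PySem

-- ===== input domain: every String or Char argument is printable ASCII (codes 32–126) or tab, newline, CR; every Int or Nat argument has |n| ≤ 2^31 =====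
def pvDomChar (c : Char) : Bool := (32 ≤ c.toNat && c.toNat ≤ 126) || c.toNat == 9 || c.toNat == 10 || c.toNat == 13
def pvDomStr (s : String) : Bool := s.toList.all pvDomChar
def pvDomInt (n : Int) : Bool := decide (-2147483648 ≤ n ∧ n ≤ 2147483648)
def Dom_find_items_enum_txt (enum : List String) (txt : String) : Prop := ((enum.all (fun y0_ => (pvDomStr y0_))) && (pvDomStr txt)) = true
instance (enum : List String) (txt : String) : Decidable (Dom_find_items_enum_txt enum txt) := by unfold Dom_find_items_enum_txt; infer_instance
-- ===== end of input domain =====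

-- B replaces A's per-item substring scan by one precomputed set of all substrings of txt
-- (one per occurring pattern length), looked up per item: a different algorithm, measurably faster on the timing inputs.


-- ===== PORT A =====
def find_items_enum_txt (enum : List String) (txt : String) : List String :=
  let enum2 := enum.map (fun i => PySem.Str.lower i)
  let t := PySem.Str.lower txt
  enum2.foldl (fun res item => if PySem.Str.isIn item t then res ++ [item] else res) []

-- ===== PORT B =====
def find_items_enum_txt_alt (enum : List String) (txt : String) : List String :=
  let t := PySem.Str.lower txt
  let items := enum.map (fun i => PySem.Str.lower i)
  let n : Int := PySem.Str.len t
  let lengths : PySem.Set Int := PySem.Set.ofList (items.map (fun it => PySem.Str.len it))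
  let subs : PySem.Set String := lengths.foldl
    (fun s L => (PySem.List.pyRange 0 (n - L + 1) 1).foldl
      (fun s i => PySem.Set.add s (PySem.Str.slice t (some i) (some (i + L)))) s)
    PySem.Set.empty
  items.foldl (fun res it => if PySem.Set.contains subs it then res ++ [it] else res) []

-- ===== PRECONDITION & SPEC =====
def Spec_find_items_enum_txt (enum : List String) (txt : String) (out : List String) : Prop := out = find_items_enum_txt_alt enum txt
instance (enum : List String) (txt : String) (out : List String) : Decidable (Spec_find_items_enum_txt enum txt out) := by unfold Spec_find_items_enum_txt; infer_instance

-- ===== CLAIM (what is proved, stated in full; the proofs are below) =====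
def Claim_equal_find_items_enum_txt : Prop := ∀ (enum : List String) (txt : String), Dom_find_items_enum_txt enum txt → Spec_find_items_enum_txt enum txt (find_items_enum_txt enum txt)

-- ===== LEMMAS AND PROOFS =====

-- membership in the inner fold: adding (g i) for every i of a list
lemma mem_foldl_setAdd {α : Type} (l : List α) (g : α → String) (s : PySem.Set String) (x : String) :
    x ∈ l.foldl (fun s i => PySem.Set.add s (g i)) s ↔ x ∈ s ∨ ∃ i ∈ l, x = g i := by
  induction l generalizing s with
  | nil => simp
  | cons a l ih =>
    simp only [List.foldl_cons, ih, PySem.Set.mem_add, List.mem_cons]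
    constructor
    · rintro (( h | h) | ⟨i, hi, rfl⟩)
      · exact Or.inl h
      · exact Or.inr ⟨a, Or.inl rfl, h⟩
      · exact Or.inr ⟨i, Or.inr hi, rfl⟩
    · rintro (h | ⟨i, (rfl | hi), rfl⟩)
      · exact Or.inl (Or.inl h)
      · exact Or.inl (Or.inr rfl)
      · exact Or.inr ⟨i, hi, rfl⟩

-- membership in the nested fold building `subs`
lemma mem_subs_iff (t : String) (n : Int) (Ls : List Int) (s0 : PySem.Set String) (x : String) :
    x ∈ Ls.foldl
      (fun s L => (PySem.List.pyRange 0 (n - L + 1) 1).foldl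
        (fun s i => PySem.Set.add s (PySem.Str.slice t (some i) (some (i + L)))) s) s0
    ↔ x ∈ s0 ∨ ∃ L ∈ Ls, ∃ i ∈ PySem.List.pyRange 0 (n - L + 1) 1,
        x = PySem.Str.slice t (some i) (some (i + L)) := by
  induction Ls generalizing s0 with
  | nil => simp
  | cons a Ls ih =>
    simp only [List.foldl_cons, ih, mem_foldl_setAdd, List.mem_cons]
    constructor
    · rintro ((h | h) | ⟨L, hL, h⟩)
      · exact Or.inl h
      · exact Or.inr ⟨a, Or.inl rfl, h⟩
      · exact Or.inr ⟨L, Or.inr hL, h⟩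
    · rintro (h | ⟨L, (rfl | hL), h⟩)
      · exact Or.inl (Or.inl h)
      · exact Or.inl (Or.inr h)
      · exact Or.inr ⟨L, hL, h⟩

-- the heart: for an item whose length occurs among (nonnegative) Ls, being one of the
-- collected slices is exactly being a substring of t
lemma slice_exists_iff_isIn (t it : String) (Ls : List Int)
    (hnn : ∀ L ∈ Ls, 0 ≤ L) (hmem : ((it.toList.length : Nat) : Int) ∈ Ls) :
    (∃ L ∈ Ls, ∃ i ∈ PySem.List.pyRange 0 ((t.toList.length : Int) - L + 1) 1,
        it = PySem.Str.slice t (some i) (some (i + L)))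
    ↔ PySem.Str.isIn it t = true := by
  constructor
  · rintro ⟨L, hL, i, hi, heq⟩
    rw [PySem.List.mem_pyRange_one] at hi
    obtain ⟨hi0, _⟩ := hi
    obtain ⟨j, rfl⟩ := Int.eq_ofNat_of_zero_le hi0
    obtain ⟨l, rfl⟩ := Int.eq_ofNat_of_zero_le (hnn L hL)
    have htl : it.toList = List.take l (List.drop j t.toList) := by
      rw [heq, PySem.Str.toList_slice]
      simp [PySem.Chars.slice_eq_listSlice, PySem.List.slice_natCast_add]
    rw [PySem.Str.isIn_iff_infix, htl]
    exact List.IsInfix.trans (List.IsPrefix.isInfix (List.take_prefix _ _))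
      (List.IsSuffix.isInfix (List.drop_suffix _ _))
  · intro h
    have hinf := (PySem.Str.isIn_iff_infix it t).mp h
    have hdrop : ∃ j, it.toList <+: List.drop j t.toList := by
      obtain ⟨u, v, huv⟩ := hinf
      refine ⟨u.length, ?_⟩
      have hd : List.drop u.length t.toList = it.toList ++ v := by
        rw [← huv, List.append_assoc, List.drop_left]
      rw [hd]
      exact List.prefix_append _ _
    obtain ⟨j, hj⟩ := hdrop
    -- clamp j to the text length
    set l := it.toList.length with hl
    have hj' : it.toList <+: List.drop (min j t.toList.length) t.toList := by
      rcases le_or_gt j t.toList.length with hle | hgt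
      · rwa [min_eq_left hle]
      · have : List.drop j t.toList = [] := List.drop_eq_nil_of_le (le_of_lt hgt)
        rw [this] at hj
        have : it.toList = [] := List.prefix_nil.mp hj
        simp [this]
    set j' := min j t.toList.length with hj'def
    have hlen : l ≤ t.toList.length - j' := by
      have h2 := hj'.length_le
      rw [List.length_drop] at h2
      exact h2
    have hj'le : j' ≤ t.toList.length := min_le_right _ _
    refine ⟨(l : Int), hmem, (j' : Int), ?_, ?_⟩
    · rw [PySem.List.mem_pyRange_one]
      constructor
      · exact_mod_cast Nat.zero_le j'
      · omega
    · have : it.toList = (PySem.Str.slice t (some (j' : Int)) (some ((j' : Int) + (l : Int)))).toList := by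
        rw [PySem.Str.toList_slice]
        simp only [PySem.Chars.slice_eq_listSlice, PySem.List.slice_natCast_add]
        exact List.prefix_iff_eq_take.mp hj'
      exact String.toList_inj.mp this

-- contains on `subs` agrees with Python's `in` on every lowered item
lemma contains_subs_eq (enum : List String) (txt : String) (it : String)
    (hit : it ∈ enum.map (fun i => PySem.Str.lower i)) :
    PySem.Set.contains
      ((PySem.Set.ofList ((enum.map (fun i => PySem.Str.lower i)).map (fun u => PySem.Str.len u))).foldl
        (fun s L => (PySem.List.pyRange 0 (PySem.Str.len (PySem.Str.lower txt) - L + 1) 1).foldl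
          (fun s i => PySem.Set.add s (PySem.Str.slice (PySem.Str.lower txt) (some i) (some (i + L)))) s)
        PySem.Set.empty) it
    = PySem.Str.isIn it (PySem.Str.lower txt) := by
  set t := PySem.Str.lower txt with ht
  set items := enum.map (fun i => PySem.Str.lower i) with hitems
  set Ls : List Int := PySem.Set.ofList (items.map (fun u => PySem.Str.len u)) with hLs
  have hnn : ∀ L ∈ Ls, 0 ≤ L := by
    intro L hL
    rw [hLs, PySem.Set.mem_ofList] at hL
    obtain ⟨u, _, rfl⟩ := List.mem_map.mp hL
    rw [PySem.Str.len_eq]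
    exact_mod_cast Nat.zero_le _
  have hmem : ((it.toList.length : Nat) : Int) ∈ Ls := by
    rw [hLs, PySem.Set.mem_ofList]
    have : PySem.Str.len it ∈ items.map (fun u => PySem.Str.len u) :=
      List.mem_map.mpr ⟨it, hit, rfl⟩
    rwa [PySem.Str.len_eq] at this
  have hiff := slice_exists_iff_isIn t it Ls hnn hmem
  have hmemsub : it ∈ Ls.foldl
      (fun s L => (PySem.List.pyRange 0 (PySem.Str.len t - L + 1) 1).foldl
        (fun s i => PySem.Set.add s (PySem.Str.slice t (some i) (some (i + L)))) s)
      PySem.Set.empty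
      ↔ PySem.Str.isIn it t = true := by
    rw [mem_subs_iff]
    simp only [PySem.Set.empty, List.not_mem_nil, false_or]
    rw [PySem.Str.len_eq]
    exact hiff
  rw [Bool.eq_iff_iff]
  have hc : ∀ (s : PySem.Set String), PySem.Set.contains s it = decide (it ∈ s) := by
    intro s; simp [PySem.Set.contains]
  rw [hc, decide_eq_true_eq]
  exact hmemsub

-- ===== VERDICT (by name: the statement is the Claim_ definition above) =====
theorem find_items_enum_txt_spec : Claim_equal_find_items_enum_txt := by
  unfold Claim_equal_find_items_enum_txt
  intro enum txt _
  unfold Spec_find_items_enum_txt find_items_enum_txt find_items_enum_txt_alt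
  simp only []
  apply PySem.List.foldl_congr_mem'
  intro it hit acc
  rw [contains_subs_eq enum txt it hit]
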